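-- pv_equiv track=rewrite | github.com/BigBIueWhale/deep_intent_search | semantic_splitter.py | custom_span_tokenize
-- ===== SOURCE A (Python) =====
-- def custom_span_tokenize(text: str) -> list[tuple[int, int]]:
--     """
--     A custom implementation that mimics NLTK's span_tokenize but uses
--     a simpler, deterministic approach based on characters.
--
--     It first attempts to split the text by newline characters ('\n').
--     If this results in fewer than 3 spans, it falls back to splitting
--     by any whitespace character (' ', '\t', '\n').
--
--     Args:
--         text: The input string to split.
--
--     Returns:
--         A list of (start, end) tuples indicating the spans of the segments.
--         The segments themselves do not include the delimiter.
--     """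
--     # First, try splitting by newlines.
--     spans = []
--     start = 0
--     delimiters = ['\n', '\r']
--     for i, char in enumerate(text):
--         if char in delimiters:
--             if i > start:  # Ensure we don't create empty spans from consecutive delimiters
--                 spans.append((start, i))
--             start = i + 1
--     if start < len(text):  # Add the final segment after the last delimiter
--         spans.append((start, len(text)))
--
--     # If we got too few splits (e.g., a single long line of text),
--     # fall back to splitting by any whitespace.
--     if len(spans) < 3:
--         spans = []  # Reset for the new strategy
--         start = 0
--         delimiters = [' ', '\t', '\n', '\r']
--         for i, char in enumerate(text):
--             if char in delimiters:
--                 if i > start:  # Ensure we don't create empty spans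
--                     spans.append((start, i))
--                 start = i + 1
--         if start < len(text):  # Add the final segment
--             spans.append((start, len(text)))
--
--     return spans
-- ===== SOURCE B (Python) =====
-- def _split_at(text, delims):
--     """Boundary method: collect delimiter positions, then pair up adjacent
--     boundaries and keep the non-empty gaps between them."""
--     cuts = [i for i, c in enumerate(text) if c in delims]
--     bounds = [-1] + cuts + [len(text)]
--     return [(a + 1, b) for a, b in zip(bounds, bounds[1:]) if b > a + 1]
--
--
-- def custom_span_tokenize(text):
--     spans = _split_at(text, '\n\r')
--     if len(spans) < 3:
--         spans = _split_at(text, ' \t\n\r')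
--     return spans
-- ===== Notes on version B (the rewrite author's own statement) =====
-- stated objective: alternative
-- what changed: Instead of A's per-character state machine (pending start index mutated at every delimiter, empty-span guard, trailing-segment patch-up), B first collects the list of delimiter positions, brackets it with the sentinels -1 and len(text), and then zips adjacent boundaries into spans, keeping only the non-empty gaps.
import Mathlib
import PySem

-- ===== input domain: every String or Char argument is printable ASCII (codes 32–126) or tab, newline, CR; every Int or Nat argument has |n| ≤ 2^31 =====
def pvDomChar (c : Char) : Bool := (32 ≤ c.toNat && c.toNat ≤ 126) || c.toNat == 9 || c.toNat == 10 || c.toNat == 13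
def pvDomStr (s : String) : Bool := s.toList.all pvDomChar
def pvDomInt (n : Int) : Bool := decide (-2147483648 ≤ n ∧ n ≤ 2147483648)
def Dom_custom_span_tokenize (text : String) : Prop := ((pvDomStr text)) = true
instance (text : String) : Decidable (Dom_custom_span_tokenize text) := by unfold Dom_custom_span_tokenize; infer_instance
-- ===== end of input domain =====

-- B replaces A's per-character state machine (pending start index, empty-span guard,
-- trailing patch-up) with a boundary method: collect delimiter positions, bracket with
-- sentinels -1 and len(text), zip adjacent boundaries into the non-empty gaps (objective: alternative).


-- ===== PORT A =====
-- 'for i, char in enumerate(text)' : the enumerated character list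
def enumFromA (i : Nat) : List Char → List (Nat × Char)
  | [] => []
  | c :: rest => (i, c) :: enumFromA (i + 1) rest

-- A's for-loop as structural recursion over the enumerated list, same state (spans, start)
def loopA (delims : List Char) : List (Int × Int) → Int → List (Nat × Char) → List (Int × Int) × Int
  | spans, start, [] => (spans, start)
  | spans, start, (i, c) :: rest =>
    if delims.contains c then
      loopA delims (if (i : Int) > start then spans ++ [(start, (i : Int))] else spans) ((i : Int) + 1) rest
    else
      loopA delims spans start rest

-- one pass of A's (twice-repeated, identical) loop + trailing-segment append
def passA (delims : List Char) (cs : List Char) : List (Int × Int) :=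
  let p := loopA delims [] 0 (enumFromA 0 cs)
  if p.2 < (cs.length : Int) then p.1 ++ [(p.2, (cs.length : Int))] else p.1

def custom_span_tokenize (text : String) : List (Int × Int) :=
  let cs := text.toList
  let spans := passA ['\n', '\r'] cs
  if spans.length < 3 then passA [' ', '\t', '\n', '\r'] cs else spans

-- ===== PORT B =====
-- cuts = [i for i, c in enumerate(text) if c in delims]
def cutsB (delims : List Char) (cs : List Char) : List Int :=
  ((PySem.List.enumerate cs 0).filter (fun p => delims.contains p.2)).map (fun p => p.1)

-- bounds = [-1] + cuts + [len(text)]; [(a+1, b) for a, b in zip(bounds, bounds[1:]) if b > a+1]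
def splitAtB (delims : List Char) (cs : List Char) : List (Int × Int) :=
  let bounds : List Int := (-1) :: (cutsB delims cs ++ [(cs.length : Int)])
  ((bounds.zip bounds.tail).filter (fun ab => ab.2 > ab.1 + 1)).map (fun ab => (ab.1 + 1, ab.2))

def custom_span_tokenize_alt (text : String) : List (Int × Int) :=
  let spans := splitAtB ['\n', '\r'] text.toList
  if spans.length < 3 then splitAtB [' ', '\t', '\n', '\r'] text.toList else spans

-- ===== PRECONDITION & SPEC =====
def Spec_custom_span_tokenize (text : String) (out : List (Int × Int)) : Prop := out = custom_span_tokenize_alt text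
instance (text : String) (out : List (Int × Int)) : Decidable (Spec_custom_span_tokenize text out) := by unfold Spec_custom_span_tokenize; infer_instance

-- ===== CLAIM (what is proved, stated in full; the proofs are below) =====
def Claim_equal_custom_span_tokenize : Prop := ∀ (text : String), Dom_custom_span_tokenize text → Spec_custom_span_tokenize text (custom_span_tokenize text)

-- ===== LEMMAS AND PROOFS =====

-- common characterization: spans produced from a previous boundary p, the list of
-- remaining delimiter positions, and the final boundary n
def mkSpans : Int → List Int → Int → List (Int × Int)
  | p, [], n => if n > p + 1 then [(p + 1, n)] else []
  | p, d :: ds, n => (if d > p + 1 then [(p + 1, d)] else []) ++ mkSpans d ds n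

-- the delimiter positions of rest, counting from index i
def dIdxFrom (delims : List Char) : Nat → List Char → List Int
  | _, [] => []
  | i, c :: rest =>
    if delims.contains c then (i : Int) :: dIdxFrom delims (i + 1) rest
    else dIdxFrom delims (i + 1) rest

-- B's zip/filter/map pipeline computes mkSpans
theorem zip_eq_mkSpans (ds : List Int) : ∀ (p n : Int),
    ((((p :: (ds ++ [n])).zip (ds ++ [n])).filter (fun ab => ab.2 > ab.1 + 1)).map
      (fun ab => (ab.1 + 1, ab.2))) = mkSpans p ds n := by
  induction ds with
  | nil => intro p n; by_cases h : n > p + 1 <;> simp [mkSpans, h]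
  | cons d ds ih =>
    intro p n
    rw [show ((d :: ds) ++ [n] : List Int) = d :: (ds ++ [n]) from rfl, List.zip_cons_cons]
    by_cases h : d > p + 1 <;> simp [mkSpans, h, ih d n]

-- the filtered enumeration is dIdxFrom
theorem cutsB_from (delims : List Char) : ∀ (cs : List Char) (i : Nat),
    (((PySem.List.enumerate cs (i : Int)).filter (fun p => delims.contains p.2)).map
      (fun p => p.1)) = dIdxFrom delims i cs := by
  intro cs
  induction cs with
  | nil => intro i; simp [dIdxFrom]
  | cons c rest ih =>
    intro i
    have h1 : ((i : Int) + 1) = ((i + 1 : Nat) : Int) := by push_cast; ring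
    rw [PySem.List.enumerate_cons, h1, List.filter_cons]
    by_cases hc : delims.contains c <;>
      simp only [hc, dIdxFrom, if_pos, if_neg, Bool.false_eq_true, not_false_iff,
        List.map_cons, ih (i + 1)]

-- the trailing-segment step of A, as a function of the loop's final state
def finishA (p : List (Int × Int) × Int) (n : Nat) : List (Int × Int) :=
  if p.2 < (n : Int) then p.1 ++ [(p.2, (n : Int))] else p.1

-- the single loop invariant: A's remaining work, plus the trailing patch-up, is
-- mkSpans from previous boundary (start - 1) over the remaining delimiter positions
theorem loopA_eq_mkSpans (delims : List Char) : ∀ (rest : List Char) (i : Nat) (start : Int)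
    (spans : List (Int × Int)),
    finishA (loopA delims spans start (enumFromA i rest)) (i + rest.length)
      = spans ++ mkSpans (start - 1) (dIdxFrom delims i rest) (((i + rest.length : Nat)) : Int) := by
  intro rest
  induction rest with
  | nil =>
    intro i start spans
    have h : start - 1 + 1 = start := by ring
    by_cases hlt : start < (i : Int) <;>
      simp [enumFromA, loopA, finishA, dIdxFrom, mkSpans, h, hlt]
  | cons c rest ih =>
    intro i start spans
    have hn : i + (c :: rest).length = (i + 1) + rest.length := by simp; omega
    have h : start - 1 + 1 = start := by ring
    by_cases hc : delims.contains c
    · have hih := ih (i + 1) ((i : Int) + 1)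
        (if (i : Int) > start then spans ++ [(start, (i : Int))] else spans)
      have h2 : (i : Int) + 1 - 1 = (i : Int) := by ring
      rw [enumFromA, hn]
      simp only [loopA, hc, if_pos, hih, h2, dIdxFrom, mkSpans, h]
      by_cases hgt : (i : Int) > start <;> simp [hgt]
    · have hih := ih (i + 1) start spans
      rw [enumFromA, hn]
      simp only [loopA, hc, if_neg, Bool.false_eq_true, not_false_iff, hih, dIdxFrom]

theorem passA_eq_splitAtB (delims : List Char) (cs : List Char) :
    passA delims cs = splitAtB delims cs := by
  have h := loopA_eq_mkSpans delims cs 0 0 []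
  simp only [Nat.zero_add] at h
  show finishA (loopA delims [] 0 (enumFromA 0 cs)) cs.length = _
  rw [h]
  show _ = (((((-1) :: (cutsB delims cs ++ [(cs.length : Int)])).zip
      (cutsB delims cs ++ [(cs.length : Int)])).filter (fun ab => ab.2 > ab.1 + 1)).map
      (fun ab => (ab.1 + 1, ab.2)))
  rw [zip_eq_mkSpans]
  have hc : cutsB delims cs = dIdxFrom delims 0 cs := by
    unfold cutsB
    exact_mod_cast cutsB_from delims cs 0
  simp [hc]

-- ===== VERDICT (by name: the statement is the Claim_ definition above) =====
theorem custom_span_tokenize_spec : Claim_equal_custom_span_tokenize := by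
  intro text _
  unfold Spec_custom_span_tokenize custom_span_tokenize custom_span_tokenize_alt
  simp only [passA_eq_splitAtB]
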